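-- pv_equiv track=rewrite | github.com/bmenrigh/everybody_codes_2024 | 07/solve_c.py | unwind_maintrack
-- ===== SOURCE A (Python) =====
-- def unwind_maintrack(mtg):
--
--     mt = []
--
--     h = len(mtg)
--     w = len(mtg[0])
--
--     def unwind_rec(cx, cy, px, py):
--
--         if any([cx < 0, cx >= w, cy < 0, cy >= h]):
--             return
--
--         if mtg[cy][cx] in "+-=S":
--             mt.append(mtg[cy][cx])
--         else:
--             return
--
--         if mtg[cy][cx] == 'S':
--             return
--
--         for dx, dy in [(0, 1), (0, -1), (1, 0), (-1, 0)]: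
--
--             nx, ny = cx + dx, cy + dy
--
--             if nx == px and ny == py:
--                 continue
--
--             unwind_rec(nx, ny, cx, cy)
--
--
--     unwind_rec(1, 0, 0, 0)
--
--     return mt
-- ===== SOURCE B (Python) =====
-- def unwind_maintrack(mtg):
--     # Iterative DFS over an explicit LIFO stack with PUSH-TIME validation:
--     # a frame is pushed only if its cell is in bounds and on the track, so the
--     # pop loop has no guards; neighbours are generated in reverse direction
--     # order so the pre-order append sequence equals the recursive walk's.
--     h = len(mtg)
--     w = len(mtg[0])
--
--     def ok(x, y):
--         return 0 <= x < w and 0 <= y < h and mtg[y][x] in "+-=S"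
--
--     mt = []
--     stack = [(1, 0, 0, 0)] if ok(1, 0) else []
--     while stack:
--         cx, cy, px, py = stack.pop()
--         c = mtg[cy][cx]
--         mt.append(c)
--         if c == 'S':
--             continue
--         stack.extend((cx + dx, cy + dy, cx, cy)
--                      for dx, dy in ((-1, 0), (1, 0), (0, -1), (0, 1))
--                      if (cx + dx, cy + dy) != (px, py) and ok(cx + dx, cy + dy))
--     return mt
-- ===== Notes on version B (the rewrite author's own statement) =====
-- stated objective: alternative
-- what changed: The recursive DFS mutating a closure list is replaced by an iterative loop over an explicit LIFO stack whose frames are validated once at push time (bounds+track checked before pushing, so the pop loop has no guards), with neighbours generated in reverse direction order to preserve the exact pre-order append sequence.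
import Mathlib
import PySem

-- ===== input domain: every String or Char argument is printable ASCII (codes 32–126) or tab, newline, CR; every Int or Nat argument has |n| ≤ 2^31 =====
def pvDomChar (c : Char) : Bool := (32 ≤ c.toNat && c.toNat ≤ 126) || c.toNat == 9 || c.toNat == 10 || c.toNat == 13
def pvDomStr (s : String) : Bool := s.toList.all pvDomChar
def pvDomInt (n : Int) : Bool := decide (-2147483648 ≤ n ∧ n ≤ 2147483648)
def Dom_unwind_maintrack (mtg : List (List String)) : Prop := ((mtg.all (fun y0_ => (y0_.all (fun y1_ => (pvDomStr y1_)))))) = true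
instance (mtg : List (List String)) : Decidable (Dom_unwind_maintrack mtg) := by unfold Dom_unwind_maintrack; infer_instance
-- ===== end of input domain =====

-- B replaces the recursive DFS (a closure mutating an outer list) by an iterative loop over
-- an explicit LIFO stack whose frames are validated at PUSH time; return value only, no
-- argument is mutated by either version.

-- shared cell access mtg[cy][cx]: exact wherever Pre_ holds (every read in range; a read out
-- of range is an IndexError in Python and is excluded by Pre_)
def pvCell (mtg : List (List String)) (x y : Int) : String :=
  (PySem.List.pyGet? ((PySem.List.pyGet? mtg y).getD []) x).getD ""

-- Python's substring test  c in "+-=S"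
def pvTrack (s : String) : Bool := PySem.Str.isIn s "+-=S"

-- ===== PORT A =====
-- the inner recursion unwind_rec; mt is the list the Python closure mutates.  fuel bounds the
-- recursion depth only: inside Pre_ the depth is at most the number of (cell, parent) states,
-- < 4·h·w + 2, so fuel never runs out (where it would, Python raises RecursionError).
def pvRecA (mtg : List (List String)) (w h : Int) :
    Nat → Int → Int → Int → Int → List String → List String
  | 0, _, _, _, _, mt => mt
  | f + 1, cx, cy, px, py, mt =>
    if cx < 0 ∨ w ≤ cx ∨ cy < 0 ∨ h ≤ cy then mt
    else if pvTrack (pvCell mtg cx cy) then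
      let mt1 := mt ++ [pvCell mtg cx cy]
      if pvCell mtg cx cy = "S" then mt1
      else
        [((0 : Int), (1 : Int)), (0, -1), (1, 0), (-1, 0)].foldl
          (fun acc d =>
            if cx + d.1 == px && cy + d.2 == py then acc
            else pvRecA mtg w h f (cx + d.1) (cy + d.2) cx cy acc) mt1
    else mt

def unwind_maintrack (mtg : List (List String)) : List String :=
  pvRecA mtg (((PySem.List.pyGet? mtg 0).getD []).length : Int) (mtg.length : Int)
    (4 * (mtg.length * ((PySem.List.pyGet? mtg 0).getD []).length) + 2) 1 0 0 0 []

-- ===== PORT B =====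
-- B's push-time validity test ok(x, y)
def pvOkB (mtg : List (List String)) (w h x y : Int) : Bool :=
  decide (0 ≤ x) && decide (x < w) && decide (0 ≤ y) && decide (y < h) &&
    pvTrack (pvCell mtg x y)

-- B's while loop; head of the list = top of the stack (Python appends/pops at the end, so the
-- generated children, built in B's direction order, are reversed onto the head).  Each frame
-- carries a branch-depth fuel as totality device only: frames are pushed with one unit less,
-- and inside Pre_ the initial fuel (≥ the longest chain of states) is never exhausted.
def pvLoopB (mtg : List (List String)) (w h : Int) :
    List (Nat × Int × Int × Int × Int) → List String → List String
  | [], mt => mt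
  | (0, _, _, _, _) :: stk, mt => pvLoopB mtg w h stk mt
  | (f + 1, cx, cy, px, py) :: stk, mt =>
    let mt1 := mt ++ [pvCell mtg cx cy]
    if pvCell mtg cx cy = "S" then pvLoopB mtg w h stk mt1
    else
      pvLoopB mtg w h
        ((([((-1 : Int), (0 : Int)), (1, 0), (0, -1), (0, 1)].filterMap
            (fun d =>
              if (cx + d.1 == px && cy + d.2 == py) ||
                  !pvOkB mtg w h (cx + d.1) (cy + d.2) then none
              else some (f, cx + d.1, cy + d.2, cx, cy))).reverse) ++ stk) mt1
  termination_by stk _ => (stk.map (fun fr => 5 ^ fr.1)).sum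
  decreasing_by
  · simp only [List.map_cons, List.sum_cons, pow_zero]; omega
  · simp only [List.map_cons, List.sum_cons]
    have h1 : 0 < 5 ^ (f + 1) := pow_pos (by omega) _
    omega
  · simp only [dite_eq_ite, List.map_cons, List.sum_cons, List.map_append, List.sum_append,
      List.map_reverse, List.sum_reverse]
    have hlen : ∀ (l : List (Int × Int)),
        (((l.filterMap (fun d =>
            if (cx + d.1 == px && cy + d.2 == py) ||
                !pvOkB mtg w h (cx + d.1) (cy + d.2) then none
            else some (f, cx + d.1, cy + d.2, cx, cy))).map
              (fun fr => 5 ^ fr.1)).sum) ≤ l.length * 5 ^ f := by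
      intro l
      induction l with
      | nil => simp
      | cons d l ih =>
        by_cases hc : (cx + d.1 == px && cy + d.2 == py ||
            !pvOkB mtg w h (cx + d.1) (cy + d.2)) = true
        · simp only [List.filterMap_cons, if_pos hc, List.length_cons]
          exact le_trans ih (Nat.mul_le_mul_right _ (Nat.le_succ _))
        · simp only [List.filterMap_cons, if_neg hc, List.map_cons, List.sum_cons,
            List.length_cons]
          calc 5 ^ f + (((l.filterMap (fun d =>
                  if (cx + d.1 == px && cy + d.2 == py) ||
                      !pvOkB mtg w h (cx + d.1) (cy + d.2) then none
                  else some (f, cx + d.1, cy + d.2, cx, cy))).map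
                    (fun fr => 5 ^ fr.1)).sum)
              ≤ 5 ^ f + l.length * 5 ^ f := by omega
            _ = (l.length + 1) * 5 ^ f := by ring
    have h4 := hlen [((-1 : Int), (0 : Int)), (1, 0), (0, -1), (0, 1)]
    have h5 : 4 * 5 ^ f < 5 ^ (f + 1) := by
      have h0 : (0:Nat) < 5 ^ f := pow_pos (by omega) _
      rw [pow_succ]; omega
    simp only [List.length_cons, List.length_nil] at h4
    omega

def unwind_maintrack_alt (mtg : List (List String)) : List String :=
  if pvOkB mtg (((PySem.List.pyGet? mtg 0).getD []).length : Int) (mtg.length : Int) 1 0 then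
    pvLoopB mtg (((PySem.List.pyGet? mtg 0).getD []).length : Int) (mtg.length : Int)
      [(4 * (mtg.length * ((PySem.List.pyGet? mtg 0).getD []).length) + 2, 1, 0, 0, 0)] []
  else []

-- ===== PRECONDITION & SPEC =====
-- State-graph analysis used only by Pre_: the states (cx, cy, px, py) the walk can reach.
def pvInB (w h : Int) (s : Int × Int × Int × Int) : Bool :=
  decide (0 ≤ s.1) && decide (s.1 < w) && decide (0 ≤ s.2.1) && decide (s.2.1 < h)

-- the read mtg[cy][cx] stays inside row cy (A raises IndexError on a too-short row)
def pvReadOk (mtg : List (List String)) (s : Int × Int × Int × Int) : Bool :=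
  decide (s.1 < (((PySem.List.pyGet? mtg s.2.1).getD []).length : Int))

-- states from which the walk continues
def pvCont (mtg : List (List String)) (w h : Int) (s : Int × Int × Int × Int) : Bool :=
  pvInB w h s && pvReadOk mtg s && pvTrack (pvCell mtg s.1 s.2.1) &&
    !(pvCell mtg s.1 s.2.1 == "S")

def pvNexts (mtg : List (List String)) (w h : Int) (s : Int × Int × Int × Int) :
    List (Int × Int × Int × Int) :=
  if pvCont mtg w h s then
    [((0 : Int), (1 : Int)), (0, -1), (1, 0), (-1, 0)].filterMap
      (fun d =>
        if s.1 + d.1 == s.2.2.1 && s.2.1 + d.2 == s.2.2.2 then none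
        else some (s.1 + d.1, s.2.1 + d.2, s.1, s.2.1))
  else []

-- reachable-state closure (a graph analysis of the input grid, not a run of either program)
def pvClosure (next : Int × Int × Int × Int → List (Int × Int × Int × Int)) :
    Nat → List (Int × Int × Int × Int) → List (Int × Int × Int × Int)
  | 0, r => r
  | n + 1, r =>
    let fresh := ((r.flatMap next).filter (fun s => !r.contains s)).dedup
    if fresh.isEmpty then r else pvClosure next n (r ++ fresh)

-- repeatedly discard states with no successor left: what remains lies on or reaches a cycle
def pvPeel (next : Int × Int × Int × Int → List (Int × Int × Int × Int)) :
    Nat → List (Int × Int × Int × Int) → List (Int × Int × Int × Int)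
  | 0, c => c
  | n + 1, c =>
    let c' := c.filter (fun s => (next s).any (fun t => c.contains t))
    if c'.length == c.length then c else pvPeel next n c'

-- Pre_ holds exactly where Python A returns normally: mtg is non-empty (else len(mtg[0]) is an
-- IndexError), no reachable state reads past the end of its row (IndexError), and no cycle of
-- states is reachable from the start (there A recurses forever — RecursionError — and Python B
-- loops forever).  It is a reachability analysis of the input's track graph, not a run of
-- either port, and it is not used by the equality proof (the two ports agree on every input
-- and every fuel); it delimits where the fuelled ports are faithful to their Pythons.
def pvAdmissible (mtg : List (List String)) : Bool :=
  decide (0 < mtg.length) &&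
    ((fun w h n =>
        (fun r =>
          r.all (fun s => !pvInB w h s || pvReadOk mtg s) &&
            (pvPeel (pvNexts mtg w h) n (r.filter (pvCont mtg w h))).isEmpty)
          (pvClosure (pvNexts mtg w h) n [(1, 0, 0, 0)]))
      (((PySem.List.pyGet? mtg 0).getD []).length : Int) (mtg.length : Int)
      (4 * (mtg.length * ((PySem.List.pyGet? mtg 0).getD []).length) + 4))

def Pre_unwind_maintrack (mtg : List (List String)) : Prop := pvAdmissible mtg = true

instance (mtg : List (List String)) : Decidable (Pre_unwind_maintrack mtg) := by
  unfold Pre_unwind_maintrack; infer_instance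

def pvWitness_unwind_maintrack : List (List String) := [["x"]]

def Spec_unwind_maintrack (mtg : List (List String)) (out : List String) : Prop := out = unwind_maintrack_alt mtg
instance (mtg : List (List String)) (out : List String) : Decidable (Spec_unwind_maintrack mtg out) := by unfold Spec_unwind_maintrack; infer_instance

-- ===== CLAIM =====
def Claim_equal_unwind_maintrack : Prop := ∀ (mtg : List (List String)), Dom_unwind_maintrack mtg → Pre_unwind_maintrack mtg → Spec_unwind_maintrack mtg (unwind_maintrack mtg)

-- ===== LEMMAS AND PROOFS =====

-- a frame that fails B's push-time test is a no-op for A's recursion, at any fuel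
theorem pvRecA_dead (mtg : List (List String)) (w h : Int) (f : Nat) (cx cy px py : Int)
    (mt : List String) (hx : pvOkB mtg w h cx cy = false) :
    pvRecA mtg w h f cx cy px py mt = mt := by
  cases f with
  | zero => rfl
  | succ f =>
    by_cases hb : cx < 0 ∨ w ≤ cx ∨ cy < 0 ∨ h ≤ cy
    · simp [pvRecA, hb]
    · have ht : pvTrack (pvCell mtg cx cy) = false := by
        simp only [pvOkB, Bool.and_eq_false_iff, decide_eq_false_iff_not, not_le, not_lt] at hx
        rcases hx with ((((h1 | h2) | h3) | h4) | h5)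
        · omega
        · omega
        · omega
        · omega
        · exact h5
      simp [pvRecA, hb, ht]

-- the loop on the empty stack returns the accumulator
theorem pvLoopB_nil (mtg : List (List String)) (w h : Int) (mt : List String) :
    pvLoopB mtg w h [] mt = mt := by
  simp [pvLoopB]

-- B's reversed push order equals A's direction order after the double reverse
theorem pv_dirs_rev :
    ([((-1 : Int), (0 : Int)), (1, 0), (0, -1), (0, 1)] : List (Int × Int)) =
      ([((0 : Int), (1 : Int)), (0, -1), (1, 0), (-1, 0)] : List (Int × Int)).reverse := by
  decide

-- pushing the surviving children of a direction list = folding A's recursion over it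
theorem pv_fold (mtg : List (List String)) (w h : Int) (f : Nat) (cx cy px py : Int)
    (IH : ∀ (cx' cy' px' py' : Int), pvOkB mtg w h cx' cy' = true →
      ∀ (stk : List (Nat × Int × Int × Int × Int)) (mt : List String),
        pvLoopB mtg w h ((f, cx', cy', px', py') :: stk) mt
          = pvLoopB mtg w h stk (pvRecA mtg w h f cx' cy' px' py' mt)) :
    ∀ (ds : List (Int × Int)) (stk : List (Nat × Int × Int × Int × Int)) (mt : List String),
      pvLoopB mtg w h
          ((ds.filterMap (fun d =>
              if (cx + d.1 == px && cy + d.2 == py) ||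
                  !pvOkB mtg w h (cx + d.1) (cy + d.2) then none
              else some (f, cx + d.1, cy + d.2, cx, cy))) ++ stk) mt
        = pvLoopB mtg w h stk
            (ds.foldl (fun acc d =>
                if cx + d.1 == px && cy + d.2 == py then acc
                else pvRecA mtg w h f (cx + d.1) (cy + d.2) cx cy acc) mt) := by
  intro ds
  induction ds with
  | nil => intro stk mt; rfl
  | cons d ds ih =>
    intro stk mt
    cases hA : (cx + d.1 == px && cy + d.2 == py) with
    | true =>
      simp only [List.filterMap_cons, List.foldl_cons, hA, Bool.true_or, if_true]
      exact ih stk mt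
    | false =>
      cases hB : pvOkB mtg w h (cx + d.1) (cy + d.2) with
      | true =>
        have hc : ¬((cx + d.1 == px && cy + d.2 == py ||
            !pvOkB mtg w h (cx + d.1) (cy + d.2)) = true) := by
          rw [hA, hB]; simp
        have hA' : ¬((cx + d.1 == px && cy + d.2 == py) = true) := by rw [hA]; simp
        simp only [List.filterMap_cons, List.foldl_cons, if_neg hc, if_neg hA',
          List.cons_append]
        rw [IH _ _ _ _ hB]
        exact ih stk _
      | false =>
        have hc : (cx + d.1 == px && cy + d.2 == py ||
            !pvOkB mtg w h (cx + d.1) (cy + d.2)) = true := by rw [hA, hB]; rfl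
        have hA' : ¬((cx + d.1 == px && cy + d.2 == py) = true) := by rw [hA]; simp
        simp only [List.filterMap_cons, List.foldl_cons, if_pos hc, if_neg hA']
        rw [pvRecA_dead mtg w h f _ _ cx cy mt hB]
        exact ih stk mt

-- the synchronisation: popping a valid frame of fuel f does exactly what A's call at fuel f does
theorem pv_sync (mtg : List (List String)) (w h : Int) :
    ∀ (f : Nat) (cx cy px py : Int), pvOkB mtg w h cx cy = true →
      ∀ (stk : List (Nat × Int × Int × Int × Int)) (mt : List String),
        pvLoopB mtg w h ((f, cx, cy, px, py) :: stk) mt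
          = pvLoopB mtg w h stk (pvRecA mtg w h f cx cy px py mt) := by
  intro f
  induction f with
  | zero => intro cx cy px py _ stk mt; simp [pvLoopB, pvRecA]
  | succ f IH =>
    intro cx cy px py hok stk mt
    have hb : ¬(cx < 0 ∨ w ≤ cx ∨ cy < 0 ∨ h ≤ cy) := by
      simp only [pvOkB, Bool.and_eq_true, decide_eq_true_eq] at hok; omega
    have ht : pvTrack (pvCell mtg cx cy) = true := by
      simp only [pvOkB, Bool.and_eq_true] at hok; exact hok.2
    by_cases hS : pvCell mtg cx cy = "S"
    · have htS : pvTrack "S" = true := by decide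
      simp [pvLoopB, pvRecA, hb, hS, htS]
    · rw [pvLoopB, pvRecA]
      simp only [hb, if_false, ht, if_true, hS]
      rw [pv_dirs_rev, List.filterMap_reverse, List.reverse_reverse]
      exact pv_fold mtg w h f cx cy px py IH
        [((0 : Int), (1 : Int)), (0, -1), (1, 0), (-1, 0)] stk (mt ++ [pvCell mtg cx cy])

-- ===== VERDICT =====
theorem unwind_maintrack_spec : Claim_equal_unwind_maintrack := by
  intro mtg _ hpre
  unfold Spec_unwind_maintrack unwind_maintrack unwind_maintrack_alt
  by_cases hok : pvOkB mtg (((PySem.List.pyGet? mtg 0).getD []).length : Int) (mtg.length : Int) 1 0 = true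
  · rw [if_pos hok, pv_sync mtg _ _ _ 1 0 0 0 hok, pvLoopB_nil]
  · rw [if_neg hok, pvRecA_dead mtg _ _ _ 1 0 0 0 [] (by simpa using hok)]
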